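-- pv_equiv track=rewrite | github.com/jsacleux/Projet-IA02 | ressources/tictactoe.py | dernierIndiceMinimum
-- ===== SOURCE A (Python) =====
-- def dernierIndiceMinimum(liste):
--     maxi = liste[0]
--     longueur=len(liste)
--     indice_max = 0
--     for i in range(longueur):
--         if liste[i] <= maxi:
--             maxi = liste[i]
--             indice_max = i
--     return indice_max
-- ===== SOURCE B (Python) =====
-- def dernierIndiceMinimum(liste):
--     # two passes: compute the minimum value, then locate its last occurrence
--     m = min(liste)
--     for i in reversed(range(len(liste))):
--         if liste[i] == m:
--             return i
-- ===== Notes on version B (the rewrite author's own statement) =====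
-- stated objective: alternative
-- what changed: Replaces A's single fused scan with <= tie-breaking state (running minimum + its index) by two separate passes: min() to get the minimum value, then a backwards scan returning the first (i.e. last) index holding it.
-- outside the precondition, e.g. on dernierIndiceMinimum([]): A raises IndexError, B raises ValueError
import Mathlib
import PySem

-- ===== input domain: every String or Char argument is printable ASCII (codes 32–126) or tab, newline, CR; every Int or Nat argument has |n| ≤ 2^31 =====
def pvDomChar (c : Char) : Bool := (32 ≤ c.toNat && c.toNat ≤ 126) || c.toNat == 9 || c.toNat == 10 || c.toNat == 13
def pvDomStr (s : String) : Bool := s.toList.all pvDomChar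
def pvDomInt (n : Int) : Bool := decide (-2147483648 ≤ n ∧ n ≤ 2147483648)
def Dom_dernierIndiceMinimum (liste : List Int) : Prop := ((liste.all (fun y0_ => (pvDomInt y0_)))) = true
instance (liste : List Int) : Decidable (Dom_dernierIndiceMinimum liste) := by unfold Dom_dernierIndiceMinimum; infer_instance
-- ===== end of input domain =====

-- B replaces A's single fused scan (running minimum with <= tie-breaking) by two passes: min(), then a backwards scan for the first index holding it (alternative decomposition, same cost).


-- ===== PORT A =====
def dernierIndiceMinimum (liste : List Int) : Int :=
  match liste with
  | [] => 0  -- Python raises IndexError at liste[0]; excluded by Pre_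
  | x0 :: _ =>
    ((PySem.List.pyRange 0 liste.length 1).foldl
      (fun (st : Int × Int) i =>
        if PySem.List.pyGetD liste i 0 ≤ st.1 then (PySem.List.pyGetD liste i 0, i) else st)
      (x0, 0)).2

-- ===== PORT B =====
def dernierIndiceMinimum_alt (liste : List Int) : Int :=
  let m := (PySem.List.min? liste (fun x => x)).getD 0   -- min(liste); empty list raises in Python, excluded by Pre_
  match ((List.range liste.length).reverse).find?
      (fun (i : Nat) => PySem.List.pyGetD liste (i : Int) 0 == m) with
  | some i => (i : Int)
  | none => 0   -- unreachable on a nonempty list (Python would fall through returning None)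

-- ===== PRECONDITION & SPEC =====
-- Pre_ excludes the empty list, on which A raises IndexError (and B raises ValueError).
def Pre_dernierIndiceMinimum (liste : List Int) : Prop := liste ≠ []
instance (liste : List Int) : Decidable (Pre_dernierIndiceMinimum liste) := by unfold Pre_dernierIndiceMinimum; infer_instance
def pvWitness_dernierIndiceMinimum : List Int := ([3, 1, 2, 1, 4])
def Spec_dernierIndiceMinimum (liste : List Int) (out : Int) : Prop := out = dernierIndiceMinimum_alt liste
instance (liste : List Int) (out : Int) : Decidable (Spec_dernierIndiceMinimum liste out) := by unfold Spec_dernierIndiceMinimum; infer_instance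

-- ===== CLAIM (what is proved, stated in full; the proofs are below) =====
def Claim_equal_dernierIndiceMinimum : Prop := ∀ (liste : List Int), Dom_dernierIndiceMinimum liste → Pre_dernierIndiceMinimum liste → Spec_dernierIndiceMinimum liste (dernierIndiceMinimum liste)

-- ===== LEMMAS AND PROOFS =====

-- A's fold over List.range n (after rewriting pyRange/pyGetD) with its invariant:
-- the state is (value at k, k) where k < n is the LAST index of the minimum of the first n elements.
theorem pvA_invariant (xs : List Int) (x0 : Int) (t : List Int) (hxs : xs = x0 :: t)
    (n : Nat) (h1 : 1 ≤ n) (hn : n ≤ xs.length) :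
    ∃ k : Nat,
      (List.range n).foldl
        (fun (st : Int × Int) (i : Nat) =>
          if xs.getD i 0 ≤ st.1 then (xs.getD i 0, (i : Int)) else st) (x0, 0)
        = (xs.getD k 0, (k : Int)) ∧
      k < n ∧ (∀ j, j < n → xs.getD k 0 ≤ xs.getD j 0) ∧
      (∀ j, k < j → j < n → xs.getD k 0 < xs.getD j 0) := by
  induction n, h1 using Nat.le_induction with
  | base =>
    refine ⟨0, ?_, by omega, ?_, by omega⟩
    · simp [List.range_succ, hxs]
    · intro j hj; interval_cases j; simp
  | succ n hn1 ih =>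
    obtain ⟨k, hfold, hk, hmin, hlast⟩ := ih (by omega)
    rw [List.range_succ, List.foldl_append, hfold]
    by_cases hc : xs.getD n 0 ≤ xs.getD k 0
    · refine ⟨n, by simp only [List.foldl_cons, List.foldl_nil]; rw [if_pos hc], by omega, ?_, by omega⟩
      intro j hj
      rcases Nat.lt_or_ge j n with h | h
      · exact le_trans hc (hmin j h)
      · have : j = n := by omega
        simp [this]
    · refine ⟨k, by simp only [List.foldl_cons, List.foldl_nil]; rw [if_neg hc], by omega, ?_, ?_⟩
      · intro j hj
        rcases Nat.lt_or_ge j n with h | h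
        · exact hmin j h
        · have : j = n := by omega
          subst this; omega
      · intro j hj1 hj2
        rcases Nat.lt_or_ge j n with h | h
        · exact hlast j hj1 h
        · have : j = n := by omega
          subst this; omega

-- find? on a reversed range returns the LARGEST index satisfying p, given nothing above it does.
theorem pvFindRev (n : Nat) (p : Nat → Bool) (k : Nat) (hk : k < n) (hpk : p k = true)
    (habove : ∀ j, k < j → j < n → p j = false) :
    (List.range n).reverse.find? p = some k := by
  induction n with
  | zero => omega
  | succ n ih =>
    rw [List.range_succ, List.reverse_append]
    simp only [List.reverse_singleton, List.singleton_append, List.find?_cons]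
    rcases Nat.lt_or_ge k n with h | h
    · rw [habove n h (by omega)]
      exact ih h (fun j hj1 hj2 => habove j hj1 (by omega))
    · have : k = n := by omega
      subst this; rw [hpk]

theorem pv_getD_mem (xs : List Int) (k : Nat) (hk : k < xs.length) : xs.getD k 0 ∈ xs := by
  rw [List.getD_eq_getElem xs 0 hk]; exact List.getElem_mem hk

-- ===== VERDICT (by name: the statement is the Claim_ definition above) =====
theorem dernierIndiceMinimum_spec : Claim_equal_dernierIndiceMinimum := by
  intro liste _ hpre
  unfold Spec_dernierIndiceMinimum
  match liste, hpre with
  | x0 :: t, _ =>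
    have hlen : 1 ≤ (x0 :: t).length := by simp
    obtain ⟨k, hfold, hk, hmin, hlast⟩ := pvA_invariant (x0 :: t) x0 t rfl (x0 :: t).length hlen le_rfl
    -- the minimum value equals (x0 :: t).getD k 0
    have hm : (PySem.List.min? (x0 :: t) (fun x => x)).getD 0 = (x0 :: t).getD k 0 := by
      obtain ⟨m, hmeq⟩ : ∃ m, PySem.List.min? (x0 :: t) (fun x => x) = some m := by
        cases hmm : PySem.List.min? (x0 :: t) (fun x => x) with
        | none => rw [PySem.List.min?_eq_none_iff] at hmm; simp at hmm
        | some m => exact ⟨m, rfl⟩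
      rw [hmeq]
      have hmem := PySem.List.min?_mem hmeq
      have hisMin := PySem.List.min?_isMin hmeq
      obtain ⟨j, hj, hje⟩ := List.mem_iff_getElem.mp hmem
      have h1 : (x0 :: t).getD k 0 ≤ m := by
        have := hmin j hj
        rw [List.getD_eq_getElem (x0 :: t) 0 hj, hje] at this
        exact this
      have h2 : m ≤ (x0 :: t).getD k 0 := hisMin _ (pv_getD_mem (x0 :: t) k hk)
      simpa using le_antisymm h2 h1
    -- rewrite A's fold into the List.range form
    have hA : ((PySem.List.pyRange 0 (x0 :: t).length 1).foldl
        (fun (st : Int × Int) i =>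
          if PySem.List.pyGetD (x0 :: t) i 0 ≤ st.1 then (PySem.List.pyGetD (x0 :: t) i 0, i) else st)
        (x0, 0))
      = (List.range (x0 :: t).length).foldl
        (fun (st : Int × Int) (i : Nat) =>
          if (x0 :: t).getD i 0 ≤ st.1 then ((x0 :: t).getD i 0, (i : Int)) else st) (x0, 0) := by
      rw [PySem.List.pyRange_one, List.foldl_map]
      simp
    have hfind : ((List.range (x0 :: t).length).reverse.find?
        (fun (i : Nat) => PySem.List.pyGetD (x0 :: t) (i : Int) 0 == (x0 :: t).getD k 0)) = some k := by
      apply pvFindRev _ _ k hk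
      · simp
      · intro j hj1 hj2
        have := hlast j hj1 hj2
        simp only [PySem.List.pyGetD_natCast]
        simpa using ne_of_gt this
    show dernierIndiceMinimum (x0 :: t) = dernierIndiceMinimum_alt (x0 :: t)
    unfold dernierIndiceMinimum dernierIndiceMinimum_alt
    simp only [hA, hfold, hm, hfind]
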